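-- pv_equiv track=rewrite | github.com/selfDoga1/projeto-psd | method2.py | _get_chunks
-- ===== SOURCE A (Python) =====
-- def _get_chunks(rows, threads_amount) -> list:
--     result = []
--     chunk_per_thread = rows // threads_amount
--     rest_division = rows % threads_amount
--     start = 0
--
--     for i in range(threads_amount):
--         end = start + chunk_per_thread
--         if i < rest_division:
--             end += 1
--         result.append([start, end])
--         start = end
--
--     return result
-- ===== SOURCE B (Python) =====
-- def _get_chunks(rows, threads_amount) -> list:
--     q, r = divmod(rows, threads_amount)
--     return [[i * q + min(i, r), (i + 1) * q + min(i + 1, r)]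
--             for i in range(threads_amount)]
-- ===== Notes on version B (the rewrite author's own statement) =====
-- stated objective: simpler
-- what changed: Replaces the sequential running-start accumulator and the i<rest branch with a single comprehension computing each [start,end] pair independently from the closed form i*q+min(i,r).
import Mathlib
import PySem

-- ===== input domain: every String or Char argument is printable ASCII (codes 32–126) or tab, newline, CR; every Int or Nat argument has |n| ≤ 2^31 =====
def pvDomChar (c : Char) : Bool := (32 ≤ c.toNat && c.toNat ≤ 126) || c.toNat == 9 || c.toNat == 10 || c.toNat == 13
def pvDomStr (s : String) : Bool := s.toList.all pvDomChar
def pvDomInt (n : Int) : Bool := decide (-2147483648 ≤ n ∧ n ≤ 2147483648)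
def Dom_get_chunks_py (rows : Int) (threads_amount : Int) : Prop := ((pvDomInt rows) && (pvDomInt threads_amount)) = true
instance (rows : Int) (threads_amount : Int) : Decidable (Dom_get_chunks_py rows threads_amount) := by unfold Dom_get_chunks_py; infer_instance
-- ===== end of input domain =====

-- B replaces A's running-start accumulator and branch with a comprehension using the closed form i*q+min(i,r); same cost, simpler.


-- ===== PORT A =====
def get_chunks_py (rows : Int) (threads_amount : Int) : List (List Int) :=
  let chunk_per_thread := PySem.Int.floordiv rows threads_amount
  let rest_division := PySem.Int.mod rows threads_amount
  let s := (PySem.List.pyRange 0 threads_amount 1).foldl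
    (fun (st : List (List Int) × Int) i =>
      let e0 := st.2 + chunk_per_thread
      let e := if i < rest_division then e0 + 1 else e0
      (st.1 ++ [[st.2, e]], e)) ([], 0)
  s.1

-- ===== PORT B =====
def get_chunks_py_alt (rows : Int) (threads_amount : Int) : List (List Int) :=
  let q := PySem.Int.floordiv rows threads_amount
  let r := PySem.Int.mod rows threads_amount
  (PySem.List.pyRange 0 threads_amount 1).map
    (fun i => [i * q + min i r, (i + 1) * q + min (i + 1) r])

-- ===== PRECONDITION & SPEC =====
-- Pre_ excludes threads_amount = 0, where Python A raises ZeroDivisionError.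
def Pre_get_chunks_py (rows : Int) (threads_amount : Int) : Prop := threads_amount ≠ 0
instance (rows : Int) (threads_amount : Int) : Decidable (Pre_get_chunks_py rows threads_amount) := by unfold Pre_get_chunks_py; infer_instance
def pvWitness_get_chunks_py : Int × Int := (10, 3)

def Spec_get_chunks_py (rows : Int) (threads_amount : Int) (out : List (List Int)) : Prop := out = get_chunks_py_alt rows threads_amount
instance (rows : Int) (threads_amount : Int) (out : List (List Int)) : Decidable (Spec_get_chunks_py rows threads_amount out) := by unfold Spec_get_chunks_py; infer_instance

-- ===== CLAIM (what is proved, stated in full; the proofs are below) =====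
def Claim_equal_get_chunks_py : Prop := ∀ (rows : Int) (threads_amount : Int), Dom_get_chunks_py rows threads_amount → Pre_get_chunks_py rows threads_amount → Spec_get_chunks_py rows threads_amount (get_chunks_py rows threads_amount)

-- ===== LEMMAS AND PROOFS =====

-- Loop invariant: starting from accumulated list L and start = a*q + min a r,
-- A's fold over range a..b produces exactly B's closed-form chunks.
lemma chunks_loop_eq (q r : Int) (b : Int) : ∀ (a : Int), a ≤ b → ∀ (L : List (List Int)),
    (PySem.List.pyRange a b 1).foldl
      (fun (st : List (List Int) × Int) i =>
        (st.1 ++ [[st.2, if i < r then st.2 + q + 1 else st.2 + q]],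
         if i < r then st.2 + q + 1 else st.2 + q)) (L, a * q + min a r)
    = (L ++ (PySem.List.pyRange a b 1).map
        (fun i => [i * q + min i r, (i + 1) * q + min (i + 1) r]),
       b * q + min b r) := by
  intro a hab
  induction hn : (b - a).toNat generalizing a with
  | zero =>
    intro L
    have hba : b = a := by omega
    subst hba
    simp [PySem.List.pyRange_one_eq_nil le_rfl]
  | succ n ih =>
    intro L
    have hlt : a < b := by omega
    rw [PySem.List.pyRange_one_cons hlt]
    simp only [List.foldl_cons, List.map_cons]
    have hstep : (if a < r then a * q + min a r + q + 1 else a * q + min a r + q)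
        = (a + 1) * q + min (a + 1) r := by
      split_ifs with h
      · have : min a r = a := by omega
        have h2 : min (a + 1) r = a + 1 := by omega
        rw [this, h2]; ring
      · have : min a r = r := by omega
        have h2 : min (a + 1) r = r := by omega
        rw [this, h2]; ring
    have := ih (a + 1) (by omega) (by omega)
      (L ++ [[a * q + min a r, (a + 1) * q + min (a + 1) r]])
    simp only [List.append_assoc, List.singleton_append] at this ⊢
    convert this using 2 <;> simp [hstep]

theorem get_chunks_py_spec : Claim_equal_get_chunks_py := by
  intro rows t _ hpre
  unfold Spec_get_chunks_py get_chunks_py get_chunks_py_alt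
  simp only []
  set q := PySem.Int.floordiv rows t with hq
  set r := PySem.Int.mod rows t with hr
  by_cases ht : t ≤ 0
  · rw [PySem.List.pyRange_one_eq_nil ht]; simp
  · push Not at ht
    have hr0 : 0 ≤ r := by
      rw [hr, PySem.Int.mod_eq_emod_of_pos ht]
      exact Int.emod_nonneg rows (by omega)
    have key := chunks_loop_eq q r t 0 (le_of_lt ht) []
    have hm : 0 * q + min 0 r = 0 := by
      have : min (0 : Int) r = 0 := by omega
      rw [this]; ring
    rw [hm] at key
    rw [key]
    simp
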